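-- pv_equiv track=rewrite | github.com/6gearss/LCS | checksum_stuff.py | create_packet
-- ===== SOURCE A (Python) =====
-- def create_packet(payload_hex: str) -> str:
--     """
--     Creates a packet from a payload hex string by:
--       1. Removing whitespace and converting to bytes.
--       2. Calculating a checksum over the payload such that:
--            (sum(payload) + checksum) mod 256 = 0
--       3. Performing byte stuffing on the payload and checksum:
--            If a byte equals SOP (0xD1) or EOP (0xDF), an escape byte (0xDE) is inserted before it.
--       4. Framing the stuffed data with SOP at the start and EOP at the end.
--
--     :param payload_hex: Hex string representing the payload (e.g., "01 02 03" or "010203")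
--     :return: Final packet as an uppercase hex string.
--              For example, with payload "01 02 03", it might return "D101020329DF"
--     """
--     # Remove any whitespace from the input hex string.
--     payload_hex = payload_hex.replace(" ", "")
--
--     # Convert the cleaned hex string into a bytes object.
--     payload_bytes = bytes.fromhex(payload_hex)
--
--     # Define the special bytes.
--     SOP     = 0xD1  # Start Of Packet
--     EOP     = 0xDF  # End Of Packet
--     STF     = 0xDE  # Escape byte
--
--     # Calculate the checksum using only the payload bytes.
--     # The checksum is chosen so that: (sum(payload) + checksum) mod 256 = 0.
--     payload_sum = sum(payload_bytes)
--     checksum = (-payload_sum) & 0xFF  # Ensures a value in 0-255.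
--
--     def stuff_data(data: bytes) -> bytes:
--         """
--         Inserts the escape byte (0xDE) before any occurrence of the SOP (0xD1) or EOP (0xDF)
--         in the provided data.
--         """
--         stuffed = bytearray()
--         for byte in data:
--             if byte in (SOP, EOP):
--                 stuffed.append(STF)
--             stuffed.append(byte)
--         return bytes(stuffed)
--
--     # Perform byte stuffing on the payload and checksum.
--     stuffed_payload  = stuff_data(payload_bytes)
--     stuffed_checksum = stuff_data(bytes([checksum]))
--
--     # Construct the final packet: SOP + stuffed_payload + stuffed_checksum + EOP.
--     packet = bytearray([SOP]) + stuffed_payload + stuffed_checksum + bytearray([EOP])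
--
--     # Return the final packet as an uppercase hex string.
--     return packet.hex().upper()
-- ===== SOURCE B (Python) =====
-- def create_packet(payload_hex: str) -> str:
--     payload = bytes.fromhex(payload_hex.replace(" ", ""))
--     checksum = (-sum(payload)) & 0xFF
--     data = payload + bytes([checksum])
--     # whole-buffer byte stuffing: escape 0xD1 and 0xDF with a preceding 0xDE
--     stuffed = data.replace(b'\xd1', b'\xde\xd1').replace(b'\xdf', b'\xde\xdf')
--     packet = b'\xd1' + stuffed + b'\xdf'
--     return "".join(format(b, "02X") for b in packet)
-- ===== Notes on version B (the rewrite author's own statement) =====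
-- stated objective: idiomatic
-- what changed: Replaces the per-byte stuff_data accumulator loop (run separately on payload and checksum) with one whole-buffer chained bytes.replace over payload+checksum, and emits uppercase hex directly via format instead of .hex().upper().
import Mathlib
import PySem

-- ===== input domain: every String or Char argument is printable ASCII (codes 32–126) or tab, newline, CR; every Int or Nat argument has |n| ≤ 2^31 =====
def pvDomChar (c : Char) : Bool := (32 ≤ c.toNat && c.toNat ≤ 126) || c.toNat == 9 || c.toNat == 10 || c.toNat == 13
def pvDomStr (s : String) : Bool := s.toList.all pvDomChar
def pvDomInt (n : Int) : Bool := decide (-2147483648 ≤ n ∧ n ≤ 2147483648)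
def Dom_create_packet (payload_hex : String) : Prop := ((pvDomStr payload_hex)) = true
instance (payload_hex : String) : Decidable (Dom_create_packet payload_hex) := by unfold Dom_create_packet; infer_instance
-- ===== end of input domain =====

-- B stuffs the whole payload+checksum buffer with two chained single-byte replaces and emits
-- uppercase hex directly, instead of A's per-byte accumulator loop run separately on payload and
-- checksum followed by .hex().upper() (objective: idiomatic; same return value on Pre_).

-- ===== PORT A =====
-- bytes.fromhex helper (shared by both ports: both Pythons call the same built-in).
-- Python 3.11 bytes.fromhex: skips ASCII whitespace BETWEEN byte pairs, never inside a pair;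
-- `none` exactly where CPython raises ValueError.
def pvIsWS (c : Char) : Bool := c == ' ' || c == '\t' || c == '\n' || c == '\r'

def pvHexVal (c : Char) : Option Nat :=
  if 48 ≤ c.toNat ∧ c.toNat ≤ 57 then some (c.toNat - 48)        -- '0'..'9'
  else if 97 ≤ c.toNat ∧ c.toNat ≤ 102 then some (c.toNat - 87)  -- 'a'..'f'
  else if 65 ≤ c.toNat ∧ c.toNat ≤ 70 then some (c.toNat - 55)   -- 'A'..'F'
  else none

def pvFromHex : List Char → Option (List Nat)
  | [] => some []
  | c :: rest =>
    if pvIsWS c then pvFromHex rest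
    else
      match rest with
      | [] => none
      | d :: rest' =>
        match pvHexVal c, pvHexVal d, pvFromHex rest' with
        | some h, some lo, some t => some ((16 * h + lo) :: t)
        | _, _, _ => none

-- A's inner helper stuff_data: per-byte loop appending to a bytearray.
def pvStuffData (data : List Nat) : List Nat :=
  data.foldl (fun stuffed b => if b == 0xD1 || b == 0xDF then stuffed ++ [0xDE, b] else stuffed ++ [b]) []

-- bytes.hex(): lowercase hex rendering of one byte.
def pvHexDigitL (d : Nat) : Char := if d < 10 then Char.ofNat (48 + d) else Char.ofNat (87 + d)
def pvByteHexL (b : Nat) : List Char := [pvHexDigitL (b / 16), pvHexDigitL (b % 16)]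

def create_packet (payload_hex : String) : String :=
  let cleaned := PySem.Str.replace payload_hex " " ""
  match pvFromHex cleaned.toList with
  | none => ""   -- bytes.fromhex raises ValueError here; excluded by Pre_
  | some payload_bytes =>
    let payload_sum : Int := payload_bytes.foldl (fun s b => s + (b : Int)) 0
    let checksum : Nat := (PySem.Int.band (-payload_sum) 0xFF).toNat
    let stuffed_payload := pvStuffData payload_bytes
    let stuffed_checksum := pvStuffData [checksum]
    let packet := [0xD1] ++ stuffed_payload ++ stuffed_checksum ++ [0xDF]
    PySem.Str.upper (String.ofList (packet.flatMap pvByteHexL))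

-- ===== PORT B =====
-- bytes.replace with a single-byte pattern (scan left to right, splice the replacement).
def pvReplaceByte (pat : Nat) (repl : List Nat) : List Nat → List Nat
  | [] => []
  | b :: t => if b == pat then repl ++ pvReplaceByte pat repl t else b :: pvReplaceByte pat repl t

-- format(b, "02X"): uppercase hex rendering of one byte.
def pvHexDigitU (d : Nat) : Char := if d < 10 then Char.ofNat (48 + d) else Char.ofNat (55 + d)
def pvByteHexU (b : Nat) : List Char := [pvHexDigitU (b / 16), pvHexDigitU (b % 16)]

def create_packet_alt (payload_hex : String) : String :=
  match pvFromHex (PySem.Str.replace payload_hex " " "").toList with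
  | none => ""   -- bytes.fromhex raises ValueError here; excluded by Pre_
  | some payload =>
    let checksum : Nat := (PySem.Int.band (-(payload.foldl (fun s b => s + (b : Int)) 0)) 0xFF).toNat
    let data := payload ++ [checksum]
    let stuffed := pvReplaceByte 0xDF [0xDE, 0xDF] (pvReplaceByte 0xD1 [0xDE, 0xD1] data)
    let packet := 0xD1 :: (stuffed ++ [0xDF])
    String.ofList (packet.flatMap pvByteHexU)

-- ===== PRECONDITION & SPEC =====
-- Pre_ excludes exactly the inputs where bytes.fromhex (after A's space removal) raises ValueError:
-- every maximal whitespace-separated chunk must consist of hex digits and have even length.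
def Pre_create_packet (payload_hex : String) : Prop :=
  ((PySem.Str.replace payload_hex " " "").toList.splitOnP pvIsWS).all
    (fun t => t.all (fun c => (pvHexVal c).isSome) && t.length % 2 == 0) = true
instance (payload_hex : String) : Decidable (Pre_create_packet payload_hex) := by
  unfold Pre_create_packet; infer_instance

def pvWitness_create_packet : String := "01 d1 df"

def Spec_create_packet (payload_hex : String) (out : String) : Prop := out = create_packet_alt payload_hex
instance (payload_hex : String) (out : String) : Decidable (Spec_create_packet payload_hex out) := by unfold Spec_create_packet; infer_instance

-- ===== CLAIM (what is proved, stated in full; the proofs are below) =====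
def Claim_equal_create_packet : Prop := ∀ (payload_hex : String), Dom_create_packet payload_hex → Pre_create_packet payload_hex → Spec_create_packet payload_hex (create_packet payload_hex)

-- ===== LEMMAS AND PROOFS =====
-- the stuffed form of one byte
def pvStuff1 (b : Nat) : List Nat := if b == 0xD1 || b == 0xDF then [0xDE, b] else [b]

theorem pvStuffData_eq_flatMap (l : List Nat) : pvStuffData l = l.flatMap pvStuff1 := by
  unfold pvStuffData
  have h : (fun (stuffed : List Nat) (b : Nat) =>
      if b == 0xD1 || b == 0xDF then stuffed ++ [0xDE, b] else stuffed ++ [b])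
      = fun stuffed b => stuffed ++ pvStuff1 b := by
    funext st b; unfold pvStuff1; split <;> rfl
  rw [h, PySem.List.foldl_append_eq_flatMap]
  rfl

theorem pvReplaceByte_eq_flatMap (pat : Nat) (repl : List Nat) (l : List Nat) :
    pvReplaceByte pat repl l = l.flatMap (fun b => if b == pat then repl else [b]) := by
  induction l with
  | nil => rfl
  | cons b t ih => simp only [pvReplaceByte, ih, List.flatMap_cons]; split <;> rfl

theorem pvReplace_replace (l : List Nat) :
    pvReplaceByte 0xDF [0xDE, 0xDF] (pvReplaceByte 0xD1 [0xDE, 0xD1] l) = l.flatMap pvStuff1 := by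
  rw [pvReplaceByte_eq_flatMap, pvReplaceByte_eq_flatMap, List.flatMap_assoc]
  congr 1
  funext b
  by_cases h1 : b = 0xD1
  · simp [h1, pvStuff1]
  · by_cases h2 : b = 0xDF <;> simp [h1, h2, pvStuff1]

theorem pvBand255_lt (a : Int) : (PySem.Int.band a 255).toNat < 256 := by
  unfold PySem.Int.band
  simp only [show Int.toNat 255 = 255 from rfl]
  have h1 := Nat.and_le_right (n := a.toNat) (m := 255)
  split_ifs <;> simp <;> omega

theorem pvHexVal_lt (c : Char) (v : Nat) (h : pvHexVal c = some v) : v < 16 := by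
  unfold pvHexVal at h
  split_ifs at h with h1 h2 h3 <;> simp_all <;> omega

theorem pvFromHex_lt (cs : List Char) (l : List Nat) (h : pvFromHex cs = some l) :
    ∀ b ∈ l, b < 256 := by
  fun_induction pvFromHex cs generalizing l
  case case1 => intro b hb; simp_all
  case case2 ih => exact ih l h
  case case3 => simp at h
  case case4 =>
    rename_i c hn d rest' hv lv t hrec hlo hhi ih
    cases h
    intro b hb
    rcases List.mem_cons.mp hb with rfl | hb'
    · have := pvHexVal_lt _ _ hhi
      have := pvHexVal_lt _ _ hlo
      omega
    · exact ih t hrec b hb'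
  case case5 => simp at h

theorem pvStuff1_lt (b : Nat) (hb : b < 256) : ∀ x ∈ pvStuff1 b, x < 256 := by
  intro x hx
  unfold pvStuff1 at hx
  split at hx <;> simp at hx <;> omega

set_option maxRecDepth 40000 in
theorem pvDigit_upper : ∀ b < 256, (pvByteHexL b).map PySem.Chars.upperChar = pvByteHexU b := by
  decide

theorem pvHexUpper (pk : List Nat) (h : ∀ b ∈ pk, b < 256) :
    (pk.flatMap pvByteHexL).map PySem.Chars.upperChar = pk.flatMap pvByteHexU := by
  induction pk with
  | nil => rfl
  | cons b t ih =>
      simp only [List.flatMap_cons, List.map_append]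
      rw [pvDigit_upper b (h b (by simp)), ih (fun x hx => h x (by simp [hx]))]

theorem pvUpper_ofList (cs : List Char) :
    PySem.Str.upper (String.ofList cs) = String.ofList (cs.map PySem.Chars.upperChar) := by
  apply String.toList_inj.mp
  simp [PySem.Str.toList_upper, PySem.Chars.upper]

-- ===== VERDICT (by name: the statement is the Claim_ definition above) =====
theorem create_packet_spec : Claim_equal_create_packet := by
  intro s _ _
  unfold Spec_create_packet
  simp only [create_packet, create_packet_alt]
  cases h : pvFromHex (PySem.Str.replace s " " "").toList with
  | none => rfl
  | some p =>
    simp only []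
    rw [pvUpper_ofList]
    congr 1
    rw [pvStuffData_eq_flatMap, pvStuffData_eq_flatMap, pvReplace_replace]
    have hp : ∀ b ∈ p, b < 256 := pvFromHex_lt _ _ h
    have hcs := pvBand255_lt (-(p.foldl (fun s b => s + (b : Int)) 0))
    have hall : ∀ b ∈ ([0xD1] ++ p.flatMap pvStuff1
        ++ [(PySem.Int.band (-(p.foldl (fun s b => s + (b : Int)) 0)) 0xFF).toNat].flatMap pvStuff1
        ++ [0xDF]), b < 256 := by
      intro b hb
      simp only [List.mem_append, List.mem_flatMap, List.mem_cons,
        List.not_mem_nil, or_false] at hb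
      rcases hb with ((rfl | ⟨x, hx, hbx⟩) | ⟨x, hx, hbx⟩) | rfl
      · omega
      · exact pvStuff1_lt x (hp x hx) b hbx
      · cases hx
        exact pvStuff1_lt _ hcs b hbx
      · omega
    rw [pvHexUpper _ hall]
    simp [List.flatMap_append]
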